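-- pv_equiv track=rewrite | github.com/ColeHanlon/H2NO | External-Data/recycle_scraper.py | extract_county_name
-- ===== SOURCE A (Python) =====
-- def extract_county_name(county_string):
--     """
--     Extracts the county name from a given string
--     :param county_string: the string that contains the county name
--     :return: a string with just the county name
--     """
--     county_words = county_string.split(' ')
--     county_name = ""
--     for word in county_words:
--         if word == "Recycling":
--             break
--         county_name += " " + word
--
--     return county_name.strip()
-- ===== SOURCE B (Python) =====
-- def extract_county_name(county_string):
--     """
--     Extracts the county name from a given string
--     :param county_string: the string that contains the county name
--     :return: a string with just the county name
--     """
--     words = county_string.split(' ')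
--     cut = words.index("Recycling") if "Recycling" in words else len(words)
--     return " ".join(words[:cut]).strip()
-- ===== Notes on version B (the rewrite author's own statement) =====
-- stated objective: simpler
-- what changed: Replaces the accumulate-and-break loop (building the string word by word with a leading space) by locating the cut index with words.index and joining the slice words[:cut] in one step; B never builds the string incrementally.
import Mathlib
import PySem

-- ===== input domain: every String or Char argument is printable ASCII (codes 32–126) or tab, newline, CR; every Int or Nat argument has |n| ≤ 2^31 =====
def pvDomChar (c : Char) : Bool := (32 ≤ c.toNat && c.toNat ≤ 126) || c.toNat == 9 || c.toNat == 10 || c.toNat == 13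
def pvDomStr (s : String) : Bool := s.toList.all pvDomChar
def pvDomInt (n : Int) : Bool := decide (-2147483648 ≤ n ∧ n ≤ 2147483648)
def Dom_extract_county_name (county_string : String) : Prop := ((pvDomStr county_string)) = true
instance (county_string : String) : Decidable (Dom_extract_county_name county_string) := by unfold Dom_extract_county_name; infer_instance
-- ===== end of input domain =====

-- B replaces A's accumulate-and-break loop by index-then-slice-then-join (simpler decomposition; return value only).

-- ===== PORT A =====
-- the for-loop with break: accumulate " " + word until "Recycling" is seen
def ecnLoop : List (List Char) → List Char → List Char
  | [], acc => acc
  | w :: ws, acc => if w = "Recycling".toList then acc else ecnLoop ws (acc ++ ' ' :: w)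

def extract_county_name (county_string : String) : String :=
  String.mk (PySem.Chars.strip (ecnLoop (PySem.Chars.splitOn county_string.toList [' ']) []))

-- ===== PORT B =====
def extract_county_name_alt (county_string : String) : String :=
  let words := PySem.Chars.splitOn county_string.toList [' ']
  let cut : Nat := match PySem.List.index? words "Recycling".toList with
    | some i => i
    | none => words.length
  String.mk (PySem.Chars.strip (PySem.Chars.join [' '] (words.take cut)))

-- ===== PRECONDITION & SPEC =====
def Spec_extract_county_name (county_string : String) (out : String) : Prop := out = extract_county_name_alt county_string
instance (county_string : String) (out : String) : Decidable (Spec_extract_county_name county_string out) := by unfold Spec_extract_county_name; infer_instance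

-- ===== CLAIM (what is proved, stated in full; the proofs are below) =====
def Claim_equal_extract_county_name : Prop := ∀ (county_string : String), Dom_extract_county_name county_string → Spec_extract_county_name county_string (extract_county_name county_string)

-- ===== LEMMAS AND PROOFS =====

-- the cut index, as B computes it
def ecnCut (ws : List (List Char)) : Nat :=
  match PySem.List.index? ws "Recycling".toList with
  | some i => i
  | none => ws.length

theorem ecnCut_cons_self (ws : List (List Char)) :
    ecnCut ("Recycling".toList :: ws) = 0 := by
  unfold ecnCut
  rw [PySem.List.index?_cons_self]

theorem ecnCut_cons_of_ne (w : List Char) (ws : List (List Char)) (h : w ≠ "Recycling".toList) :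
    ecnCut (w :: ws) = ecnCut ws + 1 := by
  unfold ecnCut
  rw [PySem.List.index?_cons_of_ne ws h]
  cases PySem.List.index? ws "Recycling".toList <;> simp

theorem ecnLoop_eq (ws : List (List Char)) (acc : List Char) :
    ecnLoop ws acc = acc ++ (ws.take (ecnCut ws)).flatMap (fun w => ' ' :: w) := by
  induction ws generalizing acc with
  | nil => simp [ecnLoop, ecnCut, PySem.List.index?]
  | cons w ws ih =>
    show (if w = "Recycling".toList then acc else ecnLoop ws (acc ++ ' ' :: w)) = _
    by_cases h : w = "Recycling".toList
    · subst h
      rw [if_pos rfl, ecnCut_cons_self]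
      simp
    · rw [if_neg h, ih, ecnCut_cons_of_ne w ws h, List.take_succ_cons]
      simp

theorem flatMap_eq_cons_join (a : List Char) (xs : List (List Char)) :
    (a :: xs).flatMap (fun w => ' ' :: w) = ' ' :: PySem.Chars.join [' '] (a :: xs) := by
  induction xs generalizing a with
  | nil => simp [PySem.Chars.join_singleton]
  | cons b xs ih => simp [PySem.Chars.join_cons_cons, ih b]

theorem strip_cons_space (l : List Char) :
    PySem.Chars.strip (' ' :: l) = PySem.Chars.strip l := by
  simp [PySem.Chars.strip, PySem.Chars.lstrip, PySem.Chars.rstrip, PySem.Chars.isspace]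

-- ===== VERDICT (by name: the statement is the Claim_ definition above) =====
theorem extract_county_name_spec : Claim_equal_extract_county_name := by
  intro s _
  unfold Spec_extract_county_name extract_county_name extract_county_name_alt
  rw [ecnLoop_eq]
  show String.mk (PySem.Chars.strip
      (((PySem.Chars.splitOn s.toList [' ']).take
        (ecnCut (PySem.Chars.splitOn s.toList [' ']))).flatMap (fun w => ' ' :: w))) =
    String.mk (PySem.Chars.strip
      (PySem.Chars.join [' '] ((PySem.Chars.splitOn s.toList [' ']).take
        (ecnCut (PySem.Chars.splitOn s.toList [' '])))))
  cases htake : (PySem.Chars.splitOn s.toList [' ']).take (ecnCut (PySem.Chars.splitOn s.toList [' '])) with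
  | nil => rw [PySem.Chars.join_nil]; simp
  | cons a xs => rw [flatMap_eq_cons_join, strip_cons_space]
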